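-- pv_equiv track=rewrite | github.com/jonasmue/adventofcode19 | day04/part2.py | condition3
-- ===== SOURCE A (Python) =====
-- def condition3(number_array):
--     adjacent = 0
--     for i in range(len(number_array) - 1):
--         if number_array[i] == number_array[i + 1]:
--             adjacent += 1
--         elif adjacent == 1:
--             return True
--         else:
--             adjacent = 0
--     return adjacent == 1
-- ===== SOURCE B (Python) =====
-- def condition3(number_array):
--     # Run-length encode the array, then test whether any run has length exactly 2.
--     runs = []
--     for x in number_array:
--         if runs and runs[-1][0] == x:
--             runs[-1][1] += 1
--         else:
--             runs.append([x, 1])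
--     return any(n == 2 for _, n in runs)
-- ===== Notes on version B (the rewrite author's own statement) =====
-- stated objective: idiomatic
-- what changed: Replaces the running adjacent-pair counter with reset and early returns by a two-stage pass: run-length encode the array, then test whether any run length equals 2.
import Mathlib
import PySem

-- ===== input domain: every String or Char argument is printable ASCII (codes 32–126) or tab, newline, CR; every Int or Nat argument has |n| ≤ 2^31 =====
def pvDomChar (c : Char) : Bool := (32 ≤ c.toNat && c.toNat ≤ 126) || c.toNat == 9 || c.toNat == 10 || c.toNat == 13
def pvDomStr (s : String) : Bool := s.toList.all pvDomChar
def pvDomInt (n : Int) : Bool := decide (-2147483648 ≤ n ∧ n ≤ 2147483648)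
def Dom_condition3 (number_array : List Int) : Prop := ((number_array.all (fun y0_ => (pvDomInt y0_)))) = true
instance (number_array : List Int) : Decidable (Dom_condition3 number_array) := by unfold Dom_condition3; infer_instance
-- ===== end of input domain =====

-- B replaces A's running adjacent-pair counter (with reset and early return) by a
-- two-stage pass: run-length encode, then test for a run of length exactly 2 (idiomatic).

-- ===== PORT A =====
-- the loop over range(len(xs)-1); indices accessed are always in range, so pyGet? never yields none
def condition3Loop (xs : List Int) (idxs : List Int) (adjacent : Int) : Bool :=
  match idxs with
  | [] => adjacent == 1
  | i :: rest =>
    if PySem.List.pyGet? xs i == PySem.List.pyGet? xs (i + 1) then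
      condition3Loop xs rest (adjacent + 1)
    else if adjacent == 1 then
      true
    else
      condition3Loop xs rest 0

def condition3 (number_array : List Int) : Bool :=
  condition3Loop number_array (PySem.List.pyRange 0 ((number_array.length : Int) - 1) 1) 0

-- ===== PORT B =====
-- one step of Source B's loop: extend the last run or start a new one
def rleStep (runs : List (Int × Int)) (x : Int) : List (Int × Int) :=
  match runs.getLast? with
  | some (v, n) => if v == x then runs.dropLast ++ [(v, n + 1)] else runs ++ [(x, 1)]
  | none => [(x, 1)]

def condition3_alt (number_array : List Int) : Bool :=
  (number_array.foldl rleStep []).any (fun r => r.2 == 2)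

-- ===== PRECONDITION & SPEC =====
def Spec_condition3 (number_array : List Int) (out : Bool) : Prop := out = condition3_alt number_array
instance (number_array : List Int) (out : Bool) : Decidable (Spec_condition3 number_array out) := by unfold Spec_condition3; infer_instance

-- ===== CLAIM (what is proved, stated in full; the proofs are below) =====
def Claim_equal_condition3 : Prop := ∀ (number_array : List Int), Dom_condition3 number_array → Spec_condition3 number_array (condition3 number_array)

-- ===== LEMMAS AND PROOFS =====

-- common characterisation: continuing a run of value v of current length n through the rest
def core (v : Int) (n : Int) : List Int → Bool
  | [] => n == 2
  | x :: rest => if v == x then core v (n + 1) rest else (n == 2 || core x 1 rest)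

theorem beq_shift (a : Int) : ((a + 1 == 2) : Bool) = (a == 1) := by
  simp only [beq_eq_decide, decide_eq_decide]
  omega

theorem foldB (xs : List Int) : ∀ (R : List (Int × Int)) (v n : Int),
    ((xs.foldl rleStep (R ++ [(v, n)])).any (fun r => r.2 == 2))
      = (R.any (fun r => r.2 == 2) || core v n xs) := by
  induction xs with
  | nil => intro R v n; simp [core]
  | cons x xs ih =>
    intro R v n
    have hstep : rleStep (R ++ [(v, n)]) x
        = if v == x then R ++ [(v, n + 1)] else (R ++ [(v, n)]) ++ [(x, 1)] := by
      simp [rleStep]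
    by_cases h : v = x
    · subst h
      simp only [List.foldl_cons, hstep, beq_self_eq_true, if_true]
      rw [ih R v (n + 1)]
      simp [core]
    · have hb : (v == x) = false := by simp [h]
      simp only [List.foldl_cons, hstep, hb, Bool.false_eq_true, if_false]
      rw [ih (R ++ [(v, n)]) x 1]
      simp [core, hb, Bool.or_assoc]

theorem altCore (x : Int) (xs : List Int) :
    condition3_alt (x :: xs) = core x 1 xs := by
  unfold condition3_alt
  have h0 : rleStep [] x = [(x, 1)] := by simp [rleStep]
  rw [List.foldl_cons, h0, show ([(x, 1)] : List (Int × Int)) = [] ++ [(x, 1)] from rfl,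
    foldB]
  simp

theorem loopA (xs : List Int) : ∀ (d i : Nat) (a : Int), xs.length - i ≤ d →
    condition3Loop xs (PySem.List.pyRange (i : Int) ((xs.length : Int) - 1) 1) a
      = (match xs.drop i with
         | [] => (a == 1)
         | v :: rest => core v (a + 1) rest) := by
  intro d
  induction d with
  | zero =>
    intro i a hd
    have hi : xs.length ≤ i := by omega
    rw [PySem.List.pyRange_one_eq_nil (by omega)]
    rw [List.drop_eq_nil_of_le hi]
    rfl
  | succ d ih =>
    intro i a hd
    by_cases hlt : i + 1 < xs.length
    · -- at least two elements remain: one real loop iteration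
      have hi1 : i < xs.length := by omega
      have hv : xs.drop i = xs[i] :: xs.drop (i + 1) := List.drop_eq_getElem_cons hi1
      have hw : xs.drop (i + 1) = xs[i + 1] :: xs.drop (i + 2) := List.drop_eq_getElem_cons hlt
      rw [PySem.List.pyRange_one_cons (by omega)]
      show (if PySem.List.pyGet? xs i == PySem.List.pyGet? xs ((i : Int) + 1) then
              condition3Loop xs (PySem.List.pyRange ((i : Int) + 1) ((xs.length : Int) - 1) 1) (a + 1)
            else if a == 1 then true
            else condition3Loop xs (PySem.List.pyRange ((i : Int) + 1) ((xs.length : Int) - 1) 1) 0) = _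
      have hg1 : PySem.List.pyGet? xs (i : Int) = some xs[i] := by
        simp [hi1]
      have hg2 : PySem.List.pyGet? xs ((i : Int) + 1) = some xs[i + 1] := by
        rw [show ((i : Int) + 1) = ((i + 1 : Nat) : Int) by push_cast; ring,
          PySem.List.pyGet?_natCast, List.getElem?_eq_getElem hlt]
      have hrec : ∀ a' : Int,
          condition3Loop xs (PySem.List.pyRange ((i : Int) + 1) ((xs.length : Int) - 1) 1) a'
            = core xs[i + 1] (a' + 1) (xs.drop (i + 2)) := by
        intro a'
        have := ih (i + 1) a' (by omega)
        rw [hw] at this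
        rw [show ((i : Int) + 1) = ((i + 1 : Nat) : Int) by push_cast; ring]
        exact this
      have hr : (match xs[i] :: List.drop (i + 1) xs with
                 | [] => ((a == 1) : Bool)
                 | v :: rest => core v (a + 1) rest) = core xs[i] (a + 1) (List.drop (i + 1) xs) := rfl
      rw [hv, hg1, hg2, hr, hw]
      by_cases heq : xs[i] = xs[i + 1]
      · simp only [heq, beq_self_eq_true, if_true, core, hrec]
      · have hb : (xs[i] == xs[i + 1]) = false := by simp [heq]
        simp only [Option.some_beq_some, hb, Bool.false_eq_true, if_false, core, hrec]
        rw [beq_shift]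
        by_cases ha : a = 1
        · simp [ha]
        · simp [ha]
    · -- at most one element remains: the range is empty
      have hge : xs.length - 1 ≤ i := by omega
      rw [PySem.List.pyRange_one_eq_nil (by omega)]
      cases hdrop : xs.drop i with
      | nil => rfl
      | cons v rest =>
        have : rest = [] := by
          have := congrArg List.length hdrop
          simp at this
          cases rest with
          | nil => rfl
          | cons w t => exfalso; simp at this; omega
        subst this
        show (a == 1) = core v (a + 1) []
        show (a == 1) = ((a + 1 == 2) : Bool)
        rw [beq_shift]

-- ===== VERDICT (by name: the statement is the Claim_ definition above) =====
theorem condition3_spec : Claim_equal_condition3 := by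
  intro xs _
  unfold Spec_condition3
  cases xs with
  | nil => decide
  | cons x rest =>
    rw [altCore]
    show condition3Loop (x :: rest) (PySem.List.pyRange 0 (((x :: rest).length : Int) - 1) 1) 0 = _
    rw [show (0 : Int) = ((0 : Nat) : Int) by norm_num,
      loopA (x :: rest) (x :: rest).length 0 (((0 : Nat) : Int)) (by omega)]
    norm_num
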